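-- pv_equiv track=rewrite | github.com/priyanka-chaudhary/code-jam | code_jam_women_2021/Impartial Offerings.py | cal_treats
-- ===== SOURCE A (Python) =====
-- def cal_treats(pet_s):
-- 	treat_size = 1
-- 	treat_tot = 1
-- 	for i in range(1, len(pet_s)):
-- 		if pet_s[i] == pet_s[i-1]:
-- 			treat_tot = treat_tot + treat_size
-- 		else:
-- 			treat_size = treat_size + 1
-- 			treat_tot = treat_tot + treat_size
-- 	return treat_tot
-- ===== SOURCE B (Python) =====
-- def cal_treats(pet_s):
--     runs = []
--     for x in pet_s:
--         if runs and runs[-1][0] == x: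
--             runs[-1][1] += 1
--         else:
--             runs.append([x, 1])
--     return sum(r * c for r, (_, c) in enumerate(runs, 1))
-- ===== Notes on version B (the rewrite author's own statement) =====
-- stated objective: alternative
-- what changed: B builds the run-length encoding of pet_s in one pass and returns the closed-form sum of run_index * run_length over the runs (enumerate from 1), instead of A's index loop over consecutive-element comparisons with two running counters; on the empty list B returns 0 where A returns 1.
-- intended difference: On the empty list A returns 1 (an artefact of initialising treat_tot = 1 before the loop) while B returns 0, the intended total number of treats for zero pets. — e.g. on cal_treats([]): A returns 1, B returns 0
import Mathlib
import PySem

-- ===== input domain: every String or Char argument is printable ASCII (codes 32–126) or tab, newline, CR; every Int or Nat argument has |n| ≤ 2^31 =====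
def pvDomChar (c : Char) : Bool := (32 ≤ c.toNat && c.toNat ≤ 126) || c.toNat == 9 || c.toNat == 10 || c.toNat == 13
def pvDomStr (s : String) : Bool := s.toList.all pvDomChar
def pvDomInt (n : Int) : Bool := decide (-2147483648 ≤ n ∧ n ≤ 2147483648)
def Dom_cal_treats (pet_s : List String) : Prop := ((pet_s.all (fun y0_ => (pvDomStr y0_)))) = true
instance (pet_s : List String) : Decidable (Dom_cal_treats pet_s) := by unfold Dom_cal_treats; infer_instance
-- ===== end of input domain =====

-- B replaces A's two-counter index loop by building the run-length encoding and summing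
-- run_index * run_length over the runs (alternative decomposition, same O(n) cost);
-- on the empty list B returns 0 where A returns 1 (stated as D_ below).

-- ===== PORT A =====
-- for i in range(1, len(pet_s)): compare pet_s[i] with pet_s[i-1], carrying (treat_size, treat_tot)
def cal_treats (pet_s : List String) : Int :=
  ((PySem.List.pyRange 1 ((pet_s.length : Int)) 1).foldl
    (fun (st : Int × Int) i =>
      if PySem.List.pyGetD pet_s i "" = PySem.List.pyGetD pet_s (i - 1) "" then
        (st.1, st.2 + st.1)
      else
        (st.1 + 1, st.2 + (st.1 + 1)))
    (1, 1)).2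

-- ===== PORT B =====
-- one pass building the run-length encoding: (value, count) pairs, last run updated in place
def pvRuns (pet_s : List String) : List (String × Int) :=
  pet_s.foldl
    (fun runs x =>
      match runs.getLast? with
      | some (y, c) => if y = x then runs.dropLast ++ [(y, c + 1)] else runs ++ [(x, 1)]
      | none => [(x, 1)])
    []

-- sum(r * c for r, (_, c) in enumerate(runs, 1))
def cal_treats_alt (pet_s : List String) : Int :=
  ((PySem.List.enumerate (pvRuns pet_s) 1).map (fun p => p.1 * p.2.2)).sum

-- ===== PRECONDITION & SPEC =====
-- On the empty list A returns 1 (an artefact of initialising treat_tot = 1 before the loop);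
-- B returns 0, the intended total number of treats for zero pets.
def D_cal_treats (pet_s : List String) : Prop := pet_s = []
instance (pet_s : List String) : Decidable (D_cal_treats pet_s) := by unfold D_cal_treats; infer_instance

def Spec_cal_treats (pet_s : List String) (out : Int) : Prop := ¬ D_cal_treats pet_s → out = cal_treats_alt pet_s
instance (pet_s : List String) (out : Int) : Decidable (Spec_cal_treats pet_s out) := by unfold Spec_cal_treats; infer_instance

def pvDiffWitness_cal_treats : List String := ([])
def pvDiffWitnessOut_cal_treats : Int × Int := (1, 0)

-- ===== CLAIM (what is proved, stated in full; the proofs are below) =====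
def Claim_unchanged_cal_treats : Prop := ∀ (pet_s : List String), Dom_cal_treats pet_s → Spec_cal_treats pet_s (cal_treats pet_s)
def Claim_changed_cal_treats : Prop := Dom_cal_treats (pvDiffWitness_cal_treats) ∧ D_cal_treats (pvDiffWitness_cal_treats) ∧ cal_treats (pvDiffWitness_cal_treats) = pvDiffWitnessOut_cal_treats.1 ∧ cal_treats_alt (pvDiffWitness_cal_treats) = pvDiffWitnessOut_cal_treats.2 ∧ pvDiffWitnessOut_cal_treats.1 ≠ pvDiffWitnessOut_cal_treats.2
def Claim_exact_cal_treats : Prop := ∀ (pet_s : List String), Dom_cal_treats pet_s → D_cal_treats pet_s → cal_treats pet_s ≠ cal_treats_alt pet_s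

-- ===== LEMMAS AND PROOFS =====

def pvRef (prev : String) (size tot : Int) : List String → Int
  | [] => tot
  | x :: xs => if x = prev then pvRef x size (tot + size) xs else pvRef x (size + 1) (tot + size + 1) xs

lemma pvFoldShift {α : Type} (g : α → Int → α) (a b : Int) (init : α) :
    (PySem.List.pyRange (a+1) (b+1) 1).foldl g init
      = (PySem.List.pyRange a b 1).foldl (fun st i => g st (i+1)) init := by
  simp only [PySem.List.pyRange_one, List.foldl_map]
  have h : (b+1-(a+1)) = b - a := by ring
  rw [h]; congr 1; funext st k; congr 1; ring

lemma pvGetDconsPos (a d : String) (l : List String) (i : Int) (h1 : 1 ≤ i) :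
    PySem.List.pyGetD (a :: l) i d = PySem.List.pyGetD l (i-1) d := by
  rw [PySem.List.pyGetD_of_nonneg _ _ (by omega : (0:Int) ≤ i),
      PySem.List.pyGetD_of_nonneg _ _ (by omega : (0:Int) ≤ i - 1)]
  have h : i.toNat = (i-1).toNat + 1 := by omega
  rw [h, List.getD_cons_succ]

lemma pvAfold (a : String) (xs : List String) (s t : Int) :
    ((PySem.List.pyRange 1 (((a :: xs).length : Int)) 1).foldl
      (fun (st : Int × Int) i =>
        if PySem.List.pyGetD (a :: xs) i "" = PySem.List.pyGetD (a :: xs) (i - 1) "" then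
          (st.1, st.2 + st.1)
        else
          (st.1 + 1, st.2 + (st.1 + 1))) (s, t)).2 = pvRef a s t xs := by
  induction xs generalizing a s t with
  | nil => simp [PySem.List.pyRange_one_eq_nil, pvRef]
  | cons b ys ih =>
    have hlen : (((a :: b :: ys).length : Int)) = ((b :: ys).length : Int) + 1 := by
      simp
    rw [hlen, PySem.List.pyRange_one_cons (by simp)]
    rw [List.foldl_cons]
    have e1 : PySem.List.pyGetD (a :: b :: ys) 1 "" = b := by
      rw [pvGetDconsPos a "" (b :: ys) 1 le_rfl]
      norm_num [PySem.List.pyGetD_zero_cons]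
    have e0 : PySem.List.pyGetD (a :: b :: ys) (1 - 1) "" = a := by
      norm_num [PySem.List.pyGetD_zero_cons]
    rw [e1, e0]
    rw [pvFoldShift
      (fun (st : Int × Int) i =>
        if PySem.List.pyGetD (a :: b :: ys) i "" = PySem.List.pyGetD (a :: b :: ys) (i - 1) "" then
          (st.1, st.2 + st.1)
        else (st.1 + 1, st.2 + (st.1 + 1))) 1 ((b :: ys).length : Int)]
    have hcong : ∀ (st : Int × Int), ∀ i ∈ PySem.List.pyRange 1 ((b :: ys).length : Int) 1,
        (if PySem.List.pyGetD (a :: b :: ys) (i+1) "" = PySem.List.pyGetD (a :: b :: ys) (i+1-1) "" then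
          (st.1, st.2 + st.1) else (st.1 + 1, st.2 + (st.1 + 1)))
        = (if PySem.List.pyGetD (b :: ys) i "" = PySem.List.pyGetD (b :: ys) (i-1) "" then
          (st.1, st.2 + st.1) else (st.1 + 1, st.2 + (st.1 + 1))) := by
      intro st i hi
      rw [PySem.List.mem_pyRange_one] at hi
      rw [pvGetDconsPos a "" (b :: ys) (i+1) (by omega)]
      have h2 : i + 1 - 1 = i := by ring
      rw [h2, pvGetDconsPos a "" (b :: ys) i (by omega)]
    rw [PySem.List.foldl_congr_mem _ _ _ _ hcong]
    by_cases hba : b = a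
    · rw [if_pos hba, ih]
      simp [pvRef, hba]
    · rw [if_neg hba, ih]
      have harg : t + (s + 1) = t + s + 1 := by ring
      rw [harg]
      simp [pvRef, hba]


def pvSumE (s : Int) (rs : List (String × Int)) : Int :=
  ((PySem.List.enumerate rs s).map (fun p => p.1 * p.2.2)).sum

lemma pvSumE_append (s : Int) (rs : List (String × Int)) (p : String × Int) :
    pvSumE s (rs ++ [p]) = pvSumE s rs + (s + (rs.length : Int)) * p.2 := by
  induction rs generalizing s with
  | nil => simp [pvSumE, PySem.List.enumerate_cons, PySem.List.enumerate_nil]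
  | cons q qs ih =>
    simp only [List.cons_append, pvSumE, PySem.List.enumerate_cons, List.map_cons, List.sum_cons]
    have := ih (s + 1)
    simp only [pvSumE] at this
    rw [this]
    simp [List.length_cons]
    ring

lemma pvBfold (xs : List String) : ∀ (rs : List (String × Int)) (y : String) (c : Int),
    rs.getLast? = some (y, c) →
    pvSumE 1 (xs.foldl
      (fun runs x =>
        match runs.getLast? with
        | some (y, c) => if y = x then runs.dropLast ++ [(y, c + 1)] else runs ++ [(x, 1)]
        | none => [(x, 1)])
      rs) = pvRef y (rs.length : Int) (pvSumE 1 rs) xs := by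
  induction xs with
  | nil => intro rs y c h; simp [pvRef]
  | cons x xs ih =>
    intro rs y c h
    have hne : rs ≠ [] := by intro e; rw [e] at h; simp at h
    have hget : rs.getLast hne = (y, c) := by
      rw [List.getLast?_eq_some_getLast hne] at h; exact Option.some_injective _ h
    have hdl : rs.dropLast ++ [(y, c)] = rs := by
      rw [← hget]; exact List.dropLast_append_getLast hne
    have hlen1 : 0 < rs.length := List.length_pos_of_ne_nil hne
    have hdlL : (rs.length : Int) = (rs.dropLast.length : Int) + 1 := by
      simp [List.length_dropLast]; omega
    rw [List.foldl_cons, h]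
    by_cases hyx : y = x
    · simp only [if_pos hyx]
      rw [ih (rs.dropLast ++ [(y, c + 1)]) y (c + 1) (by simp)]
      have hL : ((rs.dropLast ++ [(y, c + 1)]).length : Int) = (rs.length : Int) := by
        simp [List.length_dropLast]; omega
      have h1 : pvSumE 1 rs = pvSumE 1 rs.dropLast + (1 + (rs.dropLast.length : Int)) * c := by
        conv_lhs => rw [← hdl]
        rw [pvSumE_append]
      have hS : pvSumE 1 (rs.dropLast ++ [(y, c + 1)]) = pvSumE 1 rs + (rs.length : Int) := by
        rw [pvSumE_append, h1, hdlL]; ring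
      rw [hL, hS]
      have : pvRef y (rs.length : Int) (pvSumE 1 rs) (x :: xs)
          = pvRef x (rs.length : Int) (pvSumE 1 rs + (rs.length : Int)) xs := by
        simp [pvRef, hyx.symm]
      rw [this, hyx]
    · simp only [if_neg hyx]
      rw [ih (rs ++ [(x, 1)]) x 1 (by simp)]
      have hL : ((rs ++ [(x, 1)]).length : Int) = (rs.length : Int) + 1 := by simp
      have hS : pvSumE 1 (rs ++ [(x, 1)]) = pvSumE 1 rs + (rs.length : Int) + 1 := by
        rw [pvSumE_append]; ring
      rw [hL, hS]
      have hxy : ¬ (x = y) := fun e => hyx e.symm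
      simp [pvRef, hxy]

-- ===== VERDICT (by name: the statements are the Claim_ definitions above) =====
theorem cal_treats_spec : Claim_unchanged_cal_treats := by
  intro pet_s _ hD
  cases pet_s with
  | nil => exact absurd rfl hD
  | cons a xs =>
    show cal_treats (a :: xs) = cal_treats_alt (a :: xs)
    have hA : cal_treats (a :: xs) = pvRef a 1 1 xs := pvAfold a xs 1 1
    have hB : cal_treats_alt (a :: xs) = pvRef a 1 1 xs := by
      show pvSumE 1 (pvRuns (a :: xs)) = _
      unfold pvRuns
      rw [List.foldl_cons]
      rw [show (match ([] : List (String × Int)).getLast? with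
          | some (y, c) => if y = a then ([] : List (String × Int)).dropLast ++ [(y, c + 1)] else [] ++ [(a, 1)]
          | none => [(a, 1)]) = [(a, 1)] from rfl]
      rw [pvBfold xs [(a, 1)] a 1 rfl]
      norm_num [pvSumE, PySem.List.enumerate_cons, PySem.List.enumerate_nil]
    rw [hA, hB]

theorem cal_treats_changed : Claim_changed_cal_treats := by
  unfold Claim_changed_cal_treats; decide

theorem cal_treats_tight : Claim_exact_cal_treats := by
  intro pet_s _ hD
  subst hD; decide
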